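-- pv_equiv track=rewrite | github.com/e998/CS550 | 10recursion.py | crazy_eights
-- ===== SOURCE A (Python) =====
-- def crazy_eights(numbers):
-- 	if len(numbers) == 0:
-- 		return 0
-- 	elif numbers[0] == '8':
-- 		if len(numbers) == 1:
-- 			return 1
-- 		elif numbers[1] == '8':
-- 			return 2 + crazy_eights(numbers[1:])
-- 		elif numbers[1] != '8':
-- 			return 1 + crazy_eights(numbers[1:])
-- 	elif numbers[0] != '8':
-- 		return crazy_eights(numbers[1:])
-- ===== SOURCE B (Python) =====
-- def crazy_eights(numbers):
--     return numbers.count('8') + sum(1 for a, b in zip(numbers, numbers[1:]) if a == '8' and b == '8')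
-- ===== Notes on version B (the rewrite author's own statement) =====
-- stated objective: faster
-- what changed: Replaced the slicing recursion (which copies the tail at every step) with a single linear pass: count '8's plus count adjacent '8','8' pairs via zip.
import Mathlib
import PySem

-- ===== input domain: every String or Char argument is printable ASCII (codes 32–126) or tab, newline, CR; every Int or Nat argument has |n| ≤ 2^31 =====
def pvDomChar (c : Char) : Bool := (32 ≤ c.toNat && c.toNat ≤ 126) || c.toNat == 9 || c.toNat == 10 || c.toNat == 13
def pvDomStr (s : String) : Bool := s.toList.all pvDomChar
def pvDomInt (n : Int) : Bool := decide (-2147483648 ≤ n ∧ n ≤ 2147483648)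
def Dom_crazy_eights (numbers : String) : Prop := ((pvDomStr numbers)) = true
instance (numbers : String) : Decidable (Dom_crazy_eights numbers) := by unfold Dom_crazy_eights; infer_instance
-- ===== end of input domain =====

-- ===== PORT A =====
-- B replaces A's O(n^2) slicing recursion with one linear pass; return value only, no mutation.
-- literal transliteration of A's recursion on the character list (numbers[1:] = the tail)
def pvGoA : List Char → Int
  | [] => 0
  | c :: rest =>
    if c = '8' then
      match rest with
      | [] => 1
      | d :: _ => if d = '8' then 2 + pvGoA rest else 1 + pvGoA rest
    else pvGoA rest

def crazy_eights (numbers : String) : Int := pvGoA numbers.toList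

-- ===== PORT B =====
-- Source B: numbers.count('8') + sum over zip(numbers, numbers[1:]) of adjacent '8','8' pairs
def pvPairSum (l : List Char) : Int :=
  (l.zip l.tail).foldl (fun acc p => if p.1 = '8' ∧ p.2 = '8' then acc + 1 else acc) 0

def crazy_eights_alt (numbers : String) : Int :=
  (numbers.toList.count '8' : Int) + pvPairSum numbers.toList
-- ===== PRECONDITION & SPEC =====
def Spec_crazy_eights (numbers : String) (out : Int) : Prop := out = crazy_eights_alt numbers
instance (numbers : String) (out : Int) : Decidable (Spec_crazy_eights numbers out) := by unfold Spec_crazy_eights; infer_instance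

-- ===== CLAIM (what is proved, stated in full; the proofs are below) =====
def Claim_equal_crazy_eights : Prop := ∀ (numbers : String), Dom_crazy_eights numbers → Spec_crazy_eights numbers (crazy_eights numbers)

-- ===== LEMMAS AND PROOFS =====

-- ===== VERDICT (by name: the statement is the Claim_ definition above) =====
lemma pvPairSum_shift (l : List (Char × Char)) (acc : Int) :
    l.foldl (fun acc p => if p.1 = '8' ∧ p.2 = '8' then acc + 1 else acc) acc
      = acc + l.foldl (fun acc p => if p.1 = '8' ∧ p.2 = '8' then acc + 1 else acc) 0 := by
  induction l generalizing acc with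
  | nil => simp
  | cons p t ih =>
    simp only [List.foldl_cons]
    rw [ih, ih (if p.1 = '8' ∧ p.2 = '8' then (0:Int) + 1 else 0)]
    split_ifs <;> omega

lemma pvPairSum_cons (c d : Char) (t : List Char) :
    pvPairSum (c :: d :: t) = (if c = '8' ∧ d = '8' then 1 else 0) + pvPairSum (d :: t) := by
  simp only [pvPairSum, List.tail_cons, List.zip_cons_cons, List.foldl_cons]
  rw [pvPairSum_shift]
  split_ifs <;> simp

lemma pvGoA_cons_cons (c d : Char) (t : List Char) :
    pvGoA (c :: d :: t) =
      if c = '8' then (if d = '8' then 2 + pvGoA (d :: t) else 1 + pvGoA (d :: t))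
      else pvGoA (d :: t) := rfl

lemma pvGoA_eq (l : List Char) :
    pvGoA l = (l.count '8' : Int) + pvPairSum l := by
  induction l with
  | nil => simp [pvGoA, pvPairSum]
  | cons c rest ih =>
    cases rest with
    | nil =>
      by_cases hc : c = '8' <;> simp [pvGoA, pvPairSum, hc]
    | cons d t =>
      rw [pvPairSum_cons, pvGoA_cons_cons, ih]
      by_cases hc : c = '8' <;> by_cases hd : d = '8' <;>
        simp [hc, hd] <;> omega

theorem crazy_eights_spec : Claim_equal_crazy_eights := by
  intro numbers _
  unfold Spec_crazy_eights crazy_eights crazy_eights_alt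
  exact pvGoA_eq _
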